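-- pv_equiv track=rewrite | github.com/aleksarashova/UserAuthentication | Project1MOPR/zad1.py | check_distinct_vectors
-- ===== SOURCE A (Python) =====
-- def check_distinct_vectors(model):
--     met_vectors = set()
--     for _, current_vector in model.items():
--         model_tuple = tuple(current_vector)
--         if model_tuple in met_vectors:
--             return False
--         met_vectors.add(model_tuple)
--     return True
-- ===== SOURCE B (Python) =====
-- def check_distinct_vectors(model):
--     vectors = sorted(model.values())
--     return all(a != b for a, b in zip(vectors, vectors[1:]))
-- ===== Notes on version B (the rewrite author's own statement) =====
-- stated objective: alternative
-- what changed: Replaced the hash-set membership loop with early return by sorting the vector lists lexicographically and checking that no two adjacent vectors in the sorted list are equal.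
import Mathlib
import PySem

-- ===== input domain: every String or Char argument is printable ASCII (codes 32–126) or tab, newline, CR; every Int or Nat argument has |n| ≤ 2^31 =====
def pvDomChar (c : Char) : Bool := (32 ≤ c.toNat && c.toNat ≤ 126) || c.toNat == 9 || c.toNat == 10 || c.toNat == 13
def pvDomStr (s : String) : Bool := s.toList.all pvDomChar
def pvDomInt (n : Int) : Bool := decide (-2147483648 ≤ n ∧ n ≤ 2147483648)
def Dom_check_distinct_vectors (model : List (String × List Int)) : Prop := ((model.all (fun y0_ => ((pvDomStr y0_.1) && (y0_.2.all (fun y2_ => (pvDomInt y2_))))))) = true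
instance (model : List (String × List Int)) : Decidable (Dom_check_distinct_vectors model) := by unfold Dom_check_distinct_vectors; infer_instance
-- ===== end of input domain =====

-- B sorts the vector lists lexicographically and checks adjacent pairs instead of
-- accumulating a hash set with early return; same return value; A does not mutate its argument.
-- ===== PORT A =====
def cdv_loop (model : List (String × List Int)) (met : PySem.Set (List Int)) : Bool :=
  match model with
  | [] => true
  | (_, v) :: rest =>
      if PySem.Set.contains met v then false
      else cdv_loop rest (PySem.Set.add met v)

def check_distinct_vectors (model : List (String × List Int)) : Bool :=
  cdv_loop model PySem.Set.empty

-- ===== PORT B =====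
-- sorted(model.values()): Python's lexicographic list order = Mathlib's linear order on
-- List Int (nil first, then by head, then by tail); the instance is given explicitly so the
-- order lemmas apply.  vectors[1:] is ported as List.drop 1 (exact on lists).
def check_distinct_vectors_alt (model : List (String × List Int)) : Bool :=
  let vectors := @PySem.List.sorted _ _ List.instLinearOrder.toLT LinearOrder.toDecidableLT
      (model.map (fun kv => kv.2)) (fun v => v) false
  (vectors.zip (vectors.drop 1)).all (fun p => p.1 != p.2)

-- ===== PRECONDITION & SPEC =====
def Spec_check_distinct_vectors (model : List (String × List Int)) (out : Bool) : Prop := out = check_distinct_vectors_alt model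
instance (model : List (String × List Int)) (out : Bool) : Decidable (Spec_check_distinct_vectors model out) := by unfold Spec_check_distinct_vectors; infer_instance

-- ===== CLAIM (what is proved, stated in full; the proofs are below) =====
def Claim_equal_check_distinct_vectors : Prop := ∀ (model : List (String × List Int)), Dom_check_distinct_vectors model → Spec_check_distinct_vectors model (check_distinct_vectors model)

-- ===== LEMMAS AND PROOFS =====
theorem cdv_loop_iff (model : List (String × List Int)) (s : PySem.Set (List Int)) :
    cdv_loop model s = true ↔
      ((model.map (fun kv => kv.2)).Nodup ∧ ∀ v ∈ model.map (fun kv => kv.2), v ∉ s) := by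
  induction model generalizing s with
  | nil => simp [cdv_loop]
  | cons kv rest ih =>
      obtain ⟨k, v⟩ := kv
      simp only [cdv_loop, List.map_cons]
      by_cases hv : v ∈ s
      · rw [if_pos (by simp [hv])]
        simp only [Bool.false_eq_true, false_iff, not_and]
        intro _ hall
        exact absurd hv (hall v (by simp))
      · rw [if_neg (by simp [hv])]
        rw [ih, PySem.Set.add_of_not_mem hv]
        constructor
        · rintro ⟨hnd, hall⟩
          refine ⟨List.nodup_cons.mpr ⟨fun hm => ?_, hnd⟩, ?_⟩
          · have := hall v hm; simp at this
          · intro w hw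
            rcases List.mem_cons.mp hw with rfl | hw
            · exact hv
            · have := hall w hw; simp at this; exact this.1
        · rintro ⟨hnd, hall⟩
          rcases List.nodup_cons.mp hnd with ⟨hvs, hnd⟩
          refine ⟨hnd, fun w hw => ?_⟩
          simp only [List.mem_append, List.mem_singleton]
          rintro (hws | rfl)
          · exact hall w (by simp [hw]) hws
          · exact hvs hw

-- In a ≤-sorted list, all adjacent pairs distinct ↔ the whole list has no duplicates.
theorem adj_ne_iff_nodup (s : List (List Int)) (h : s.Pairwise (· ≤ ·)) :
    ((s.zip (s.drop 1)).all (fun p => p.1 != p.2)) = true ↔ s.Nodup := by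
  induction s with
  | nil => simp
  | cons a t ih =>
      cases t with
      | nil => simp
      | cons b t' =>
          rcases List.pairwise_cons.mp h with ⟨h1, h2⟩
          rcases List.pairwise_cons.mp h2 with ⟨hb, -⟩
          simp only [List.drop_succ_cons, List.drop_zero, List.zip_cons_cons, List.all_cons,
            Bool.and_eq_true, bne_iff_ne, ne_eq]
          rw [show (b :: t').zip t' = (b :: t').zip ((b :: t').drop 1) from by simp,
            ih h2]
          constructor
          · rintro ⟨hab, hnd⟩
            refine List.nodup_cons.mpr ⟨fun hm => ?_, hnd⟩
            rcases List.mem_cons.mp hm with rfl | hm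
            · exact hab rfl
            · exact hab (le_antisymm (h1 b (by simp)) (hb a hm))
          · intro hnd
            rcases List.nodup_cons.mp hnd with ⟨hnm, hnd'⟩
            exact ⟨fun hab => hnm (hab ▸ List.mem_cons_self ..), hnd'⟩

-- ===== VERDICT (by name: the statement is the Claim_ definition above) =====
theorem check_distinct_vectors_spec : Claim_equal_check_distinct_vectors := by
  intro model _
  unfold Spec_check_distinct_vectors check_distinct_vectors check_distinct_vectors_alt
  set vs := model.map (fun kv => kv.2) with hvs
  set srt := @PySem.List.sorted _ _ List.instLinearOrder.toLT LinearOrder.toDecidableLT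
      vs (fun v => v) false with hsrt
  have hperm : srt.Perm vs := @PySem.List.sorted_perm _ _ List.instLinearOrder.toLT
      LinearOrder.toDecidableLT vs (fun v => v) false
  have hpw : srt.Pairwise (· ≤ ·) := PySem.List.sorted_pairwise vs (fun v => v)
  rw [Bool.eq_iff_iff, cdv_loop_iff]
  simp only [PySem.Set.empty, List.not_mem_nil, not_false_iff, imp_true_iff, and_true]
  rw [adj_ne_iff_nodup srt hpw, hperm.nodup_iff]
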